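-- pv_equiv track=rewrite | github.com/senjoyee/sap-ewa-analyzer | backend/utils/analysis_pack.py | _build_search_preview
-- ===== SOURCE A (Python) =====
-- from typing import Any, Dict, List
--
-- _MAX_SECTION_PREVIEW_CHARS = 800
--
-- def _build_search_preview(content: str, tokens: List[str]) -> str:
--     if not content:
--         return ""
--     content_lower = content.lower()
--     first_match = min((content_lower.find(token) for token in tokens if token in content_lower), default=-1)
--     if first_match == -1:
--         return content[:_MAX_SECTION_PREVIEW_CHARS]
--     start = max(0, first_match - 180)
--     end = min(len(content), first_match + 420)
--     return content[start:end].strip()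
-- ===== SOURCE B (Python) =====
-- _MAX_SECTION_PREVIEW_CHARS = 800
--
--
-- def _build_search_preview(content, tokens):
--     # position-major scan: walk the text once left-to-right and stop at the
--     # first position where any token starts (instead of min over per-token find)
--     if not content:
--         return ""
--     low = content.lower()
--     first_match = -1
--     for i in range(len(low)):
--         if any(low.startswith(t, i) for t in tokens):
--             first_match = i
--             break
--     if first_match == -1:
--         return content[:_MAX_SECTION_PREVIEW_CHARS]
--     start = max(0, first_match - 180)
--     end = min(len(content), first_match + 420)
--     return content[start:end].strip()
-- ===== Notes on version B (the rewrite author's own statement) =====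
-- stated objective: alternative
-- what changed: Replaces A's token-major pass (compute each token's first find over the whole lowered text, filter by membership, take the min, default -1) with a single position-major left-to-right scan that stops at the first index where any token starts.
import Mathlib
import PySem

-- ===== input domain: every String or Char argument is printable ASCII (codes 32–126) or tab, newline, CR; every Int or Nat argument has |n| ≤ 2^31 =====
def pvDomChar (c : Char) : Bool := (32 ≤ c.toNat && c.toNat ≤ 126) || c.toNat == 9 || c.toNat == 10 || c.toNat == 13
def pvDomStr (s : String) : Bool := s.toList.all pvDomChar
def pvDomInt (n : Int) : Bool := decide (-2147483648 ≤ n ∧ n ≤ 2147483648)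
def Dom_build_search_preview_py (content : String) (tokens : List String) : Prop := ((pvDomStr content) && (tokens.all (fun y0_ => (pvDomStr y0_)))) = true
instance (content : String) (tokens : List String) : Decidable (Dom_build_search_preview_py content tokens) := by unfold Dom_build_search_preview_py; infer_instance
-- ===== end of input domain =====

-- B replaces A's token-major 'min over each token's find' with a single position-major
-- left-to-right scan that stops at the first index where any token starts (objective: alternative).

-- ===== PORT A =====
def build_search_preview_py (content : String) (tokens : List String) : String :=
  if content.toList = [] then ""
  else
    let content_lower := PySem.Str.lower content
    let finds := (tokens.filter (fun t => PySem.Str.isIn t content_lower)).map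
        (fun t => PySem.Str.find content_lower t)
    let first_match : Int := (PySem.List.min? finds (fun x => x)).getD (-1)
    if first_match = -1 then PySem.Str.slice content none (some 800)
    else
      let start := max 0 (first_match - 180)
      let stop := min (PySem.Str.len content) (first_match + 420)
      PySem.Str.strip (PySem.Str.slice content (some start) (some stop))

-- ===== PORT B =====
-- 'any(low.startswith(t, i) for t in tokens)': for 0 ≤ i ≤ len(low), startswith(t, i)
-- is exactly 't is a prefix of low[i:]' (exact on this range).
def bMatchAt (low : List Char) (tokens : List String) (i : Nat) : Bool :=
  tokens.any (fun t => PySem.Chars.startswith (low.drop i) t.toList)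

-- the 'for i in range(len(low)) … break' loop of Source B
def bScan (low : List Char) (tokens : List String) (i : Nat) : Int :=
  if i < low.length then
    if bMatchAt low tokens i then (i : Int)
    else bScan low tokens (i + 1)
  else -1
termination_by low.length - i

def build_search_preview_py_alt (content : String) (tokens : List String) : String :=
  if content.toList = [] then ""
  else
    let low := PySem.Chars.lower content.toList
    let first_match := bScan low tokens 0
    if first_match = -1 then PySem.Str.slice content none (some 800)
    else
      let start := max 0 (first_match - 180)
      let stop := min (PySem.Str.len content) (first_match + 420)
      PySem.Str.strip (PySem.Str.slice content (some start) (some stop))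

-- ===== PRECONDITION & SPEC =====
def Spec_build_search_preview_py (content : String) (tokens : List String) (out : String) : Prop := out = build_search_preview_py_alt content tokens
instance (content : String) (tokens : List String) (out : String) : Decidable (Spec_build_search_preview_py content tokens out) := by unfold Spec_build_search_preview_py; infer_instance

-- ===== CLAIM (what is proved, stated in full; the proofs are below) =====
def Claim_equal_build_search_preview_py : Prop := ∀ (content : String) (tokens : List String), Dom_build_search_preview_py content tokens → Spec_build_search_preview_py content tokens (build_search_preview_py content tokens)

-- ===== LEMMAS AND PROOFS =====

-- if no token ever matches, the scan runs off the end and returns -1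
lemma bScan_eq_neg_one (low : List Char) (tokens : List String)
    (h : ∀ i, bMatchAt low tokens i = false) :
    ∀ start, bScan low tokens start = -1 := by
  intro start
  induction hfuel : low.length - start using Nat.strong_induction_on generalizing start with
  | _ fuel ih =>
    unfold bScan
    split
    · rw [h start]
      simp only [Bool.false_eq_true, if_false]
      exact ih (low.length - (start + 1)) (by omega) (start + 1) rfl
    · rfl

-- the scan returns the least matching index
lemma bScan_eq_of_first (low : List Char) (tokens : List String) (m : Nat)
    (hm : m < low.length) (hP : bMatchAt low tokens m = true)
    (hlt : ∀ i, i < m → bMatchAt low tokens i = false) :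
    ∀ start, start ≤ m → bScan low tokens start = (m : Int) := by
  intro start
  induction hfuel : m - start using Nat.strong_induction_on generalizing start with
  | _ fuel ih =>
    intro hsm
    unfold bScan
    have hlen : start < low.length := by omega
    rw [if_pos hlen]
    by_cases he : start = m
    · subst he; rw [hP]; simp
    · rw [hlt start (by omega)]
      simp only [Bool.false_eq_true, if_false]
      exact ih (m - (start + 1)) (by omega) (start + 1) rfl (by omega)

-- core: A's 'min over finds, default -1' equals B's position-major scan from 0
lemma first_match_eq (L : List Char) (tokens : List String) (hL : L ≠ []) :
    (PySem.List.min?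
        ((tokens.filter (fun t => PySem.Chars.isIn t.toList L)).map
          (fun t => PySem.Chars.find L t.toList)) (fun x => x)).getD (-1)
      = bScan L tokens 0 := by
  by_cases hex : ∃ t ∈ tokens, PySem.Chars.isIn t.toList L = true
  · -- some token occurs
    obtain ⟨t0, ht0, hin0⟩ := hex
    have hne : (tokens.filter (fun t => PySem.Chars.isIn t.toList L)).map
        (fun t => PySem.Chars.find L t.toList) ≠ [] := by
      simp only [ne_eq, List.map_eq_nil_iff, List.filter_eq_nil_iff, not_forall]
      exact ⟨t0, ht0, by simp [hin0]⟩
    obtain ⟨m, hm⟩ : ∃ m, PySem.List.min?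
        ((tokens.filter (fun t => PySem.Chars.isIn t.toList L)).map
          (fun t => PySem.Chars.find L t.toList)) (fun x => x) = some m := by
      cases hmin : PySem.List.min?
          ((tokens.filter (fun t => PySem.Chars.isIn t.toList L)).map
            (fun t => PySem.Chars.find L t.toList)) (fun x => x) with
      | none => exact absurd ((PySem.List.min?_eq_none_iff _ _).1 hmin) hne
      | some m => exact ⟨m, rfl⟩
    rw [hm]
    -- m is a find value of some present token
    obtain ⟨t1, ht1mem, hfind1⟩ : ∃ t1, (t1 ∈ tokens ∧ PySem.Chars.isIn t1.toList L = true)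
        ∧ PySem.Chars.find L t1.toList = m := by
      have := PySem.List.min?_mem hm
      simp only [List.mem_map, List.mem_filter] at this
      obtain ⟨t1, h1, h2⟩ := this
      exact ⟨t1, ⟨h1.1, h1.2⟩, h2⟩
    have hmin : ∀ t ∈ tokens, PySem.Chars.isIn t.toList L = true →
        m ≤ PySem.Chars.find L t.toList := by
      intro t ht hin
      have := PySem.List.min?_isMin hm (PySem.Chars.find L t.toList)
        (by simp only [List.mem_map, List.mem_filter]; exact ⟨t, ⟨ht, hin⟩, rfl⟩)
      exact this
    have hm0 : 0 ≤ m := by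
      rw [← hfind1]
      refine (PySem.Chars.find_nonneg_iff _ _).2 ?_
      by_contra h
      rw [← PySem.Chars.isIn_eq_false_iff] at h
      rw [ht1mem.2] at h
      simp at h
    -- prefix at m
    have hpre : t1.toList <+: L.drop m.toNat := by
      rw [← hfind1] at hm0 ⊢
      exact (PySem.Chars.find_spec hm0).1
    have hPm : bMatchAt L tokens m.toNat = true := by
      simp only [bMatchAt, List.any_eq_true]
      exact ⟨t1, ht1mem.1, (PySem.Chars.startswith_iff _ _).2 hpre⟩
    -- nothing matches before m
    have hlt : ∀ i, i < m.toNat → bMatchAt L tokens i = false := by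
      intro i hi
      simp only [bMatchAt, List.any_eq_false]
      intro t ht
      rw [Bool.not_eq_true, ← Bool.not_eq_true]
      intro hsw
      have hpre : t.toList <+: L.drop i := (PySem.Chars.startswith_iff _ _).1 hsw
      have hin : PySem.Chars.isIn t.toList L = true :=
        (PySem.Chars.exists_prefix_drop_iff_isIn _ _).1 ⟨i, hpre⟩
      have hge := hmin t ht hin
      have h0 : 0 ≤ PySem.Chars.find L t.toList := le_trans hm0 hge
      have := (PySem.Chars.find_spec h0).2 i (by omega)
      exact this hpre
    -- m.toNat is inside the list
    have hmlen : m.toNat < L.length := by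
      rcases hpre with ⟨rest, hrest⟩
      by_cases hnil : t1.toList = []
      · have : PySem.Chars.find L t1.toList = 0 := by rw [hnil]; exact PySem.Chars.find_nil L
        have : m = 0 := by rw [← hfind1, this]
        subst this
        simpa [List.length_pos_iff] using hL
      · have hd : L.drop m.toNat ≠ [] := by
          intro hdnil; rw [hdnil] at hrest
          exact hnil (by cases t1.toList <;> simp_all)
        have : ¬ L.length ≤ m.toNat := fun hle => hd (List.drop_eq_nil_iff.2 hle)
        omega
    have := bScan_eq_of_first L tokens m.toNat hmlen hPm hlt 0 (Nat.zero_le _)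
    rw [this]
    simp [Int.toNat_of_nonneg hm0]
  · -- no token occurs
    simp only [not_exists, not_and] at hex
    have hfilter : tokens.filter (fun t => PySem.Chars.isIn t.toList L) = [] := by
      rw [List.filter_eq_nil_iff]
      intro t ht
      simp only [Bool.not_eq_true]
      cases h : PySem.Chars.isIn t.toList L
      · rfl
      · exact absurd h (hex t ht)
    have hnomatch : ∀ i, bMatchAt L tokens i = false := by
      intro i
      simp only [bMatchAt, List.any_eq_false]
      intro t ht
      rw [Bool.not_eq_true, ← Bool.not_eq_true]
      intro hsw
      have hin : PySem.Chars.isIn t.toList L = true :=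
        (PySem.Chars.exists_prefix_drop_iff_isIn _ _).1
          ⟨i, (PySem.Chars.startswith_iff _ _).1 hsw⟩
      exact absurd hin (hex t ht)
    rw [hfilter, bScan_eq_neg_one L tokens hnomatch 0]
    simp [PySem.List.min?]

lemma lower_ne_nil (cs : List Char) (h : cs ≠ []) : PySem.Chars.lower cs ≠ [] := by
  simp [PySem.Chars.lower, h]

-- ===== VERDICT (by name: the statement is the Claim_ definition above) =====
theorem build_search_preview_py_spec : Claim_equal_build_search_preview_py := by
  intro content tokens _
  unfold Spec_build_search_preview_py build_search_preview_py build_search_preview_py_alt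
  by_cases hc : content.toList = []
  · simp [hc]
  · simp only [if_neg hc]
    have hfind : ∀ t : String, PySem.Str.find (PySem.Str.lower content) t
        = PySem.Chars.find (PySem.Chars.lower content.toList) t.toList := by
      intro t; rw [PySem.Str.find_eq, PySem.Str.toList_lower]
    have hisin : ∀ t : String, PySem.Str.isIn t (PySem.Str.lower content)
        = PySem.Chars.isIn t.toList (PySem.Chars.lower content.toList) := by
      intro t; rw [PySem.Str.isIn_eq, PySem.Str.toList_lower]
    simp only [hfind, hisin]
    rw [first_match_eq (PySem.Chars.lower content.toList) tokens (lower_ne_nil _ hc)]
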